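-- pv_equiv track=rewrite | github.com/Gh0styTongue/tiktok-auto-compiler | tik.py | format_title_with_hashtags
-- ===== SOURCE A (Python) =====
-- MAX_HASHTAGS = 1
--
-- def format_title_with_hashtags(title):
--     parts = title.split()
--     clean_words = []
--     hashtag_count = 0
--     for word in parts:
--         if word.startswith("#"):
--             if hashtag_count < MAX_HASHTAGS:
--                 clean_words.append(word)
--                 hashtag_count += 1
--         else:
--             clean_words.append(word)
--     return " ".join(clean_words)
-- ===== SOURCE B (Python) =====
-- MAX_HASHTAGS = 1
--
-- def format_title_with_hashtags(title):
--     parts = title.split()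
--     idx = [i for i, w in enumerate(parts) if w.startswith("#")]
--     drop = set(idx[MAX_HASHTAGS:])
--     return " ".join(w for i, w in enumerate(parts) if i not in drop)
-- ===== Notes on version B (the rewrite author's own statement) =====
-- stated objective: alternative
-- what changed: Replaces the running-hashtag-counter accumulation loop by an index-table decomposition: collect the positions of hashtag words, put the positions beyond MAX_HASHTAGS into an exclusion set, then join the words whose position is not excluded in one filtering pass.
import Mathlib
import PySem

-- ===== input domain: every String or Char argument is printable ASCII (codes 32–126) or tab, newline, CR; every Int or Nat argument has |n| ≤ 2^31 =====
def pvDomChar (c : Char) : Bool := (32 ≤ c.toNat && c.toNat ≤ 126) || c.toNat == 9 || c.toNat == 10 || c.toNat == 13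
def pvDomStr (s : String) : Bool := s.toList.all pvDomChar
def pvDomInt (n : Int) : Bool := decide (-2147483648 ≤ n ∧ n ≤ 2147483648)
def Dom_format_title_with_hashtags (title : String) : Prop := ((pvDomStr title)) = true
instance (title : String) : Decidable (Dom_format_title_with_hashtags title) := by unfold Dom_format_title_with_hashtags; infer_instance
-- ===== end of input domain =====

-- B replaces A's running-hashtag-counter loop by an index-table-then-filter decomposition
-- (collect hashtag positions, exclude those beyond MAX_HASHTAGS, join the rest); alternative, same cost.

def MAX_HASHTAGS : Int := 1

-- ===== PORT A =====
def format_title_with_hashtags (title : String) : String :=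
  let parts := PySem.Str.split₀ title
  let st := parts.foldl (fun (st : List String × Int) word =>
      if PySem.Str.startswith word "#" then
        if st.2 < MAX_HASHTAGS then (st.1 ++ [word], st.2 + 1) else st
      else (st.1 ++ [word], st.2)) ([], 0)
  PySem.Str.join " " st.1

-- ===== PORT B =====
def format_title_with_hashtags_alt (title : String) : String :=
  let parts := PySem.Str.split₀ title
  let idx := ((PySem.List.enumerate parts 0).filter
      (fun p => PySem.Str.startswith p.2 "#")).map (·.1)
  let drop := PySem.Set.ofList (PySem.List.slice idx (some MAX_HASHTAGS) none)
  PySem.Str.join " " (((PySem.List.enumerate parts 0).filter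
      (fun p => !(PySem.Set.contains drop p.1))).map (·.2))

-- ===== PRECONDITION & SPEC =====
def Spec_format_title_with_hashtags (title : String) (out : String) : Prop := out = format_title_with_hashtags_alt title
instance (title : String) (out : String) : Decidable (Spec_format_title_with_hashtags title out) := by unfold Spec_format_title_with_hashtags; infer_instance

-- ===== CLAIM (what is proved, stated in full; the proofs are below) =====
def Claim_equal_format_title_with_hashtags : Prop := ∀ (title : String), Dom_format_title_with_hashtags title → Spec_format_title_with_hashtags title (format_title_with_hashtags title)

-- ===== LEMMAS AND PROOFS =====

-- canonical "keep words, keep a hashtag only if none kept yet" (b = hashtag already kept)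
def keepH (b : Bool) : List String → List String
  | [] => []
  | w :: ws =>
    if PySem.Str.startswith w "#" then
      if b then keepH b ws else w :: keepH true ws
    else w :: keepH b ws

-- positions (starting at s) of hashtag words
def hidx (s : Int) (ws : List String) : List Int :=
  ((PySem.List.enumerate ws s).filter (fun p => PySem.Str.startswith p.2 "#")).map (·.1)

lemma hidx_cons (s : Int) (w : String) (ws : List String) :
    hidx s (w :: ws) =
      if PySem.Str.startswith w "#" then s :: hidx (s + 1) ws else hidx (s + 1) ws := by
  simp only [hidx, PySem.List.enumerate_cons, List.filter_cons]
  by_cases h : PySem.Str.startswith w "#" = true <;> simp_all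

lemma hidx_ge (s : Int) (ws : List String) : ∀ i ∈ hidx s ws, s ≤ i := by
  intro i hi
  simp only [hidx, List.mem_map, List.mem_filter] at hi
  obtain ⟨p, ⟨hp, _⟩, rfl⟩ := hi
  rw [PySem.List.mem_enumerate_iff] at hp
  obtain ⟨k, _, rfl⟩ := hp
  simp

lemma A_loop (ws : List String) : ∀ (acc : List String) (c : Int), 0 ≤ c →
    (ws.foldl (fun (st : List String × Int) word =>
      if PySem.Str.startswith word "#" then
        if st.2 < MAX_HASHTAGS then (st.1 ++ [word], st.2 + 1) else st
      else (st.1 ++ [word], st.2)) (acc, c)).1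
    = acc ++ keepH (decide (1 ≤ c)) ws := by
  induction ws with
  | nil => intro acc c _; simp [keepH]
  | cons w ws ih =>
    intro acc c hc
    simp only [List.foldl_cons, keepH]
    by_cases hw : PySem.Str.startswith w "#" = true
    · by_cases hcm : c < MAX_HASHTAGS
      · have hc0 : ¬ (1 ≤ c) := by simp [MAX_HASHTAGS] at hcm; omega
        have h1 : (1 ≤ c + 1) := by omega
        simp only [hw, if_true, hcm, if_true]
        rw [ih (acc ++ [w]) (c + 1) (by omega)]
        simp [hc0, h1]
      · have hc1 : (1 ≤ c) := by simp [MAX_HASHTAGS] at hcm; omega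
        simp only [hw, if_true, hcm, if_false]
        rw [ih acc c hc]
        simp [hc1]
    · simp only [hw, if_false, Bool.false_eq_true]
      rw [ih (acc ++ [w]) c hc]
      simp

-- B's filtering pass, generalised over the enumeration start and the "already kept" flag
lemma B_loop (ws : List String) : ∀ (s : Int) (b : Bool),
    (((PySem.List.enumerate ws s).filter
        (fun p => !(decide (p.1 ∈ (if b then hidx s ws else (hidx s ws).drop 1))))).map (·.2))
    = keepH b ws := by
  induction ws with
  | nil => intro s b; simp [PySem.List.enumerate_nil, keepH]
  | cons w ws ih =>
    intro s b
    have hge : ∀ i ∈ hidx (s + 1) ws, s + 1 ≤ i := hidx_ge (s + 1) ws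
    have htail : ∀ (D D' : List Int), (∀ p ∈ PySem.List.enumerate ws (s + 1), (p.1 ∈ D ↔ p.1 ∈ D')) →
        (PySem.List.enumerate ws (s + 1)).filter (fun p => !(decide (p.1 ∈ D)))
        = (PySem.List.enumerate ws (s + 1)).filter (fun p => !(decide (p.1 ∈ D'))) := by
      intro D D' h
      apply List.filter_congr
      intro p hp; simp [h p hp]
    have hfst : ∀ p ∈ PySem.List.enumerate ws (s + 1), s + 1 ≤ p.1 := by
      intro p hp
      rw [PySem.List.mem_enumerate_iff] at hp
      obtain ⟨k, _, rfl⟩ := hp; simp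
    simp only [PySem.List.enumerate_cons, List.filter_cons, hidx_cons, keepH]
    by_cases hw : PySem.Str.startswith w "#" = true
    · simp only [hw, if_true]
      cases b with
      | true =>
        have hsh : s ∈ s :: hidx (s + 1) ws := List.mem_cons_self ..
        simp only [if_true, hsh, decide_true, Bool.not_true, Bool.false_eq_true, if_false]
        rw [htail (s :: hidx (s + 1) ws) (hidx (s + 1) ws)
          (by intro p hp
              have := hfst p hp
              constructor
              · intro h; rcases List.mem_cons.mp h with h | h
                · omega
                · exact h
              · intro h; exact List.mem_cons_of_mem _ h)]
        have := ih (s + 1) true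
        simp only [if_true] at this
        rw [this]
      | false =>
        have hns : s ∉ (s :: hidx (s + 1) ws).drop 1 := by
          simp only [List.drop_one, List.tail_cons]
          intro h; have := hge s h; omega
        simp only [Bool.false_eq_true, if_false, List.drop_one, List.tail_cons] at hns ⊢
        simp only [hns, decide_false, Bool.not_false, if_true, List.map_cons]
        have := ih (s + 1) true
        simp only [if_true] at this
        rw [this]
    · simp only [hw, Bool.false_eq_true, if_false]
      have hns : s ∉ (if b then hidx (s + 1) ws else (hidx (s + 1) ws).drop 1) := by
        intro h
        have hmem : s ∈ hidx (s + 1) ws := by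
          cases b with
          | true => simpa using h
          | false => simp only [if_false, Bool.false_eq_true] at h; exact List.mem_of_mem_drop h
        have := hge s hmem; omega
      simp only [hns, decide_false, Bool.not_false, if_true, List.map_cons]
      rw [ih (s + 1) b]

-- the two word lists agree, for any parts list
lemma main_list (parts : List String) :
    (parts.foldl (fun (st : List String × Int) word =>
      if PySem.Str.startswith word "#" then
        if st.2 < MAX_HASHTAGS then (st.1 ++ [word], st.2 + 1) else st
      else (st.1 ++ [word], st.2)) ([], 0)).1
    = ((PySem.List.enumerate parts 0).filter
        (fun p => !(PySem.Set.contains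
          (PySem.Set.ofList (PySem.List.slice
            (((PySem.List.enumerate parts 0).filter
              (fun p => PySem.Str.startswith p.2 "#")).map (·.1))
            (some MAX_HASHTAGS) none)) p.1))).map (·.2) := by
  rw [A_loop parts [] 0 (by omega)]
  simp only [List.nil_append]
  have hidx_eq : ((PySem.List.enumerate parts 0).filter
      (fun p => PySem.Str.startswith p.2 "#")).map (·.1) = hidx 0 parts := rfl
  have hsl : PySem.List.slice (hidx 0 parts) (some MAX_HASHTAGS) none = (hidx 0 parts).drop 1 := by
    have h1 : MAX_HASHTAGS = ((1 : Nat) : Int) := by simp [MAX_HASHTAGS]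
    rw [h1, PySem.List.slice_from_natCast]
  rw [hidx_eq, hsl]
  have hset : ∀ (p : Int × String),
      (PySem.Set.contains (PySem.Set.ofList ((hidx 0 parts).drop 1)) p.1)
      = decide (p.1 ∈ (hidx 0 parts).drop 1) := by
    intro p
    by_cases h : p.1 ∈ (hidx 0 parts).drop 1 <;>
      simp [PySem.Set.mem_ofList]
  have hB := B_loop parts 0 false
  simp only [Bool.false_eq_true, if_false] at hB
  rw [List.filter_congr (fun p _ => by rw [hset p]), hB]
  simp

-- ===== VERDICT (by name: the statement is the Claim_ definition above) =====
theorem format_title_with_hashtags_spec : Claim_equal_format_title_with_hashtags := by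
  intro title _
  unfold Spec_format_title_with_hashtags format_title_with_hashtags format_title_with_hashtags_alt
  exact congrArg (PySem.Str.join " ") (main_list (PySem.Str.split₀ title))
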